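-- pv_equiv track=rewrite | github.com/ShogoNoguchi/PredANNpp | codes_3s/predann/models/modeling_fineEMenc.py | get_eeg_channel_index
-- ===== SOURCE A (Python) =====
-- egi_128_elecNames = [f"E{i}" for i in range(1,129)]
--
-- def get_eeg_channel_index(ch_names: list):
--     """
--     ch_names: List of electrode names used by the user.
--     Returns: Index list from egi_128_elecNames
--     """
--     idx_list = []
--     for c in ch_names:
--         if c in egi_128_elecNames:
--             idx_list.append( egi_128_elecNames.index(c) )
--         else:
--             # unknown => skip or fallback
--             pass
--     return idx_list
-- ===== SOURCE B (Python) =====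
-- def _parse(c):
--     # Accept exactly the canonical names 'E1'..'E128'; index is n-1.
--     if isinstance(c, str) and c[:1] == "E" and c[1:].isdigit():
--         n = int(c[1:])
--         if 1 <= n <= 128 and c == f"E{n}":
--             return [n - 1]
--     return []
--
-- def get_eeg_channel_index(ch_names: list):
--     return [i for c in ch_names for i in _parse(c)]
-- ===== Notes on version B (the rewrite author's own statement) =====
-- stated objective: faster
-- what changed: Replaces the per-name linear membership test plus a second linear .index scan over the 128-entry table with direct arithmetic parsing of each name ('E'+digits, exact round-trip, 1<=n<=128 gives index n-1), so no table is consulted at all.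
import Mathlib
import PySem

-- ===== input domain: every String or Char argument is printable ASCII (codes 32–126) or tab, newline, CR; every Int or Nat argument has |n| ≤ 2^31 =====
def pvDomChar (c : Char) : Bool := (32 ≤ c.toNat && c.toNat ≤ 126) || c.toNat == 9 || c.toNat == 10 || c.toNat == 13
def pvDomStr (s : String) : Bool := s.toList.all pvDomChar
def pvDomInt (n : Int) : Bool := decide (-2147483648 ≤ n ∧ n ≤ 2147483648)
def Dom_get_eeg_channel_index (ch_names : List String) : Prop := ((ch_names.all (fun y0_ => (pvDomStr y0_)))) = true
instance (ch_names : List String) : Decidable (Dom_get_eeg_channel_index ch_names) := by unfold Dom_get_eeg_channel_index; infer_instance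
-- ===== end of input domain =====

-- B replaces A's two linear scans of the 128-entry name table per channel by direct parsing
-- of each name ('E' + digits, exact round-trip, 1<=n<=128 gives index n-1); no table at all.


-- ===== PORT A =====
-- egi_128_elecNames = [f"E{i}" for i in range(1,129)]
def pvEgi : List String := (PySem.List.pyRange 1 129).map (fun i => String.ofList ('E' :: PySem.Int.toChars i))

def get_eeg_channel_index (ch_names : List String) : List Int :=
  ch_names.foldl
    (fun idx_list c =>
      if c ∈ pvEgi then
        idx_list ++ [(((PySem.List.index? pvEgi c).getD 0 : Nat) : Int)]  -- membership guarantees index? is some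
      else idx_list)
    []

-- ===== PORT B =====
def pvParse (c : String) : List Int :=
  if PySem.List.slice c.toList none (some 1) = ['E'] ∧
     PySem.Chars.strIsdigit (PySem.List.slice c.toList (some 1) none) = true then
    match PySem.Int.ofChars? (PySem.List.slice c.toList (some 1) none) with  -- int() cannot fail after isdigit on the ASCII domain
    | some n => if 1 ≤ n ∧ n ≤ 128 ∧ c.toList = 'E' :: PySem.Int.toChars n then [n - 1] else []
    | none => []
  else []

def get_eeg_channel_index_alt (ch_names : List String) : List Int :=
  ch_names.flatMap pvParse

-- ===== PRECONDITION & SPEC =====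
def Spec_get_eeg_channel_index (ch_names : List String) (out : List Int) : Prop := out = get_eeg_channel_index_alt ch_names
instance (ch_names : List String) (out : List Int) : Decidable (Spec_get_eeg_channel_index ch_names out) := by unfold Spec_get_eeg_channel_index; infer_instance

-- ===== CLAIM (what is proved, stated in full; the proofs are below) =====
def Claim_equal_get_eeg_channel_index : Prop := ∀ (ch_names : List String), Dom_get_eeg_channel_index ch_names → Spec_get_eeg_channel_index ch_names (get_eeg_channel_index ch_names)

-- ===== LEMMAS AND PROOFS =====

-- A's per-element contribution equals B's per-element contribution.
theorem pv_step_eq (c : String) :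
    (if c ∈ pvEgi then [(((PySem.List.index? pvEgi c).getD 0 : Nat) : Int)] else []) = pvParse c := by
  by_cases h : c ∈ pvEgi
  · obtain ⟨i, hi, rfl⟩ := List.mem_map.1 h
    obtain ⟨hlo, hhi⟩ := PySem.List.mem_pyRange_one.1 hi
    interval_cases i <;> decide
  · rw [if_neg h]
    unfold pvParse
    split_ifs with h1
    · cases hn : PySem.Int.ofChars? (PySem.List.slice c.toList (some 1) none) with
      | none => rfl
      | some n =>
        show [] = if 1 ≤ n ∧ n ≤ 128 ∧ c.toList = 'E' :: PySem.Int.toChars n then [n - 1] else []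
        split_ifs with h2
        · exfalso
          apply h
          obtain ⟨hn1, hn2, hc⟩ := h2
          have hc' : c = String.ofList ('E' :: PySem.Int.toChars n) := by
            rw [← hc, String.ofList_toList]
          rw [hc']
          exact List.mem_map.2 ⟨n, PySem.List.mem_pyRange_one.2 ⟨hn1, by omega⟩, rfl⟩
        · rfl
    · rfl

theorem pv_loop_eq (l : List String) (acc : List Int) :
    l.foldl
      (fun idx_list c =>
        if c ∈ pvEgi then
          idx_list ++ [(((PySem.List.index? pvEgi c).getD 0 : Nat) : Int)]
        else idx_list)
      acc = acc ++ l.flatMap pvParse := by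
  induction l generalizing acc with
  | nil => simp
  | cons c t ih =>
    have hstep :
        (if c ∈ pvEgi then acc ++ [(((PySem.List.index? pvEgi c).getD 0 : Nat) : Int)] else acc)
          = acc ++ pvParse c := by
      rw [← pv_step_eq c]; split_ifs <;> simp
    simp only [List.foldl_cons, List.flatMap_cons, hstep, ih, List.append_assoc]

-- ===== VERDICT (by name: the statement is the Claim_ definition above) =====
theorem get_eeg_channel_index_spec : Claim_equal_get_eeg_channel_index := by
  intro ch_names _
  unfold Spec_get_eeg_channel_index get_eeg_channel_index get_eeg_channel_index_alt
  rw [pv_loop_eq]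
  simp
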